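-- pv_equiv track=rewrite | github.com/XyzHuy/-DL-Fine-tuning-coding-model | data/solution/Solution1100.py | numKLenSubstrNoRepeats
-- ===== SOURCE A (Python) =====
-- def numKLenSubstrNoRepeats(s: str, k: int) -> int:
--     if k > len(s):
--         return 0
--
--     count = 0
--     window = {}
--
--     # Initialize the first window
--     for i in range(k):
--         if s[i] in window:
--             window[s[i]] += 1
--         else:
--             window[s[i]] = 1
--
--     # Check the first window
--     if len(window) == k:
--         count += 1
--
--     # Slide the window over the string
--     for i in range(k, len(s)):
--         # Add the new character to the window
--         if s[i] in window:
--             window[s[i]] += 1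
--         else:
--             window[s[i]] = 1
--
--         # Remove the old character from the window
--         window[s[i - k]] -= 1
--         if window[s[i - k]] == 0:
--             del window[s[i - k]]
--
--         # Check if the current window has no repeated characters
--         if len(window) == k:
--             count += 1
--
--     return count
-- ===== SOURCE B (Python) =====
-- def numKLenSubstrNoRepeats(s: str, k: int) -> int:
--     if k < 0 or k > len(s):
--         return 0
--     return sum(1 for i in range(len(s) - k + 1) if len(set(s[i:i+k])) == k)
-- ===== Notes on version B (the rewrite author's own statement) =====
-- stated objective: simpler
-- what changed: Replaces the sliding-window frequency dict (incremental add/remove/erase bookkeeping) by a one-line sum over window start positions that tests each window's distinctness from scratch with a set.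
-- crash fix: On every k < 0 A raises IndexError or KeyError (negative slice/index bookkeeping in the sliding loop); B returns 0 there. — e.g. on numKLenSubstrNoRepeats("ab", -1): A raises KeyError, B returns 0
import Mathlib
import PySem

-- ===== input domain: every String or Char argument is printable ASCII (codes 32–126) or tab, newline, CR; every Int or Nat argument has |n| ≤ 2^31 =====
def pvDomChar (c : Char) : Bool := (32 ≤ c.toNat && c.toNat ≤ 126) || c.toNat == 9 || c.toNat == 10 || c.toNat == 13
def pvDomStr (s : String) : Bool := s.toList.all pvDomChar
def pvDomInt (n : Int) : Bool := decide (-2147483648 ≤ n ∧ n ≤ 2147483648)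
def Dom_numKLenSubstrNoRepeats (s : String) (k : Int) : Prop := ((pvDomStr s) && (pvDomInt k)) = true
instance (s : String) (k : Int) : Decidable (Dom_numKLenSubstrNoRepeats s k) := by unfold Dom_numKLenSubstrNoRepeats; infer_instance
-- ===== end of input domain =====

-- B replaces A's sliding-window frequency dict by a plain sum over window starts,
-- testing each window's distinctness from scratch with a set (objective: simpler).

-- ===== PORT A =====
-- one sliding step of A's loop body: add s[i], decrement s[i-k], drop zero entries, count
-- (s[i]/s[i-k] are read with pyGet?; the ' ' default is never taken inside Pre_, where indices are in range
-- and s[i-k] is always a present key, so the 'window[s[i-k]] -= 1' KeyError cannot fire)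
def pvSlideStep (cs : List Char) (k : Int) (st : Int × PySem.Dict Char Int) (i : Int) :
    Int × PySem.Dict Char Int :=
  let c := (PySem.List.pyGet? cs i).getD ' '
  let w := if st.2.contains c then st.2.insert c (st.2.getD c 0 + 1) else st.2.insert c 1
  let cold := (PySem.List.pyGet? cs (i - k)).getD ' '
  let w := w.insert cold (w.getD cold 0 - 1)
  let w := if w.getD cold 0 = 0 then w.erase cold else w
  (if (w.size : Int) = k then st.1 + 1 else st.1, w)

def numKLenSubstrNoRepeats (s : String) (k : Int) : Int :=
  if k > PySem.Str.len s then 0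
  else
    let cs := s.toList
    -- initialize the first window
    let window := (PySem.List.pyRange 0 k).foldl
      (fun (w : PySem.Dict Char Int) i =>
        let c := (PySem.List.pyGet? cs i).getD ' '
        if w.contains c then w.insert c (w.getD c 0 + 1) else w.insert c 1)
      PySem.Dict.empty
    -- check the first window
    let count : Int := if (window.size : Int) = k then 1 else 0
    -- slide the window over the string
    let res := (PySem.List.pyRange k (PySem.Str.len s)).foldl (pvSlideStep cs k) (count, window)
    res.1

-- ===== PORT B =====
def numKLenSubstrNoRepeats_alt (s : String) (k : Int) : Int :=
  if k < 0 ∨ k > PySem.Str.len s then 0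
  else
    let cs := s.toList
    (PySem.List.pyRange 0 ((cs.length : Int) - k + 1)).foldl
    (fun acc i =>
      if ((PySem.Set.ofList (PySem.List.slice cs (some i) (some (i + k)))).length : Int) = k
        then acc + 1 else acc) 0

-- ===== PRECONDITION & SPEC =====
-- Pre_ excludes exactly k < 0, where the Python A raises (IndexError/KeyError from the sliding loop).
def Pre_numKLenSubstrNoRepeats (s : String) (k : Int) : Prop := 0 ≤ k
instance (s : String) (k : Int) : Decidable (Pre_numKLenSubstrNoRepeats s k) := by
  unfold Pre_numKLenSubstrNoRepeats; infer_instance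
def pvWitness_numKLenSubstrNoRepeats : String × Int := ("abcab", 3)

-- On every k < 0 A raises IndexError or KeyError (negative slice/index bookkeeping in the sliding loop); B returns 0 there.
def Raises_numKLenSubstrNoRepeats (s : String) (k : Int) : Prop := k < 0
instance (s : String) (k : Int) : Decidable (Raises_numKLenSubstrNoRepeats s k) := by
  unfold Raises_numKLenSubstrNoRepeats; infer_instance
def pvRaiseWitness_numKLenSubstrNoRepeats : String × Int := ("ab", -1)
def pvRaiseWitnessOut_numKLenSubstrNoRepeats : Int := 0

def Spec_numKLenSubstrNoRepeats (s : String) (k : Int) (out : Int) : Prop := out = numKLenSubstrNoRepeats_alt s k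
instance (s : String) (k : Int) (out : Int) : Decidable (Spec_numKLenSubstrNoRepeats s k out) := by unfold Spec_numKLenSubstrNoRepeats; infer_instance

-- ===== CLAIM (what is proved, stated in full; the proofs are below) =====
def Claim_equal_numKLenSubstrNoRepeats : Prop := ∀ (s : String) (k : Int), Dom_numKLenSubstrNoRepeats s k → Pre_numKLenSubstrNoRepeats s k → Spec_numKLenSubstrNoRepeats s k (numKLenSubstrNoRepeats s k)
def Claim_raises_numKLenSubstrNoRepeats : Prop := (∀ (s : String) (k : Int), Dom_numKLenSubstrNoRepeats s k → Raises_numKLenSubstrNoRepeats s k → ¬ Pre_numKLenSubstrNoRepeats s k) ∧ (Dom_numKLenSubstrNoRepeats (pvRaiseWitness_numKLenSubstrNoRepeats.1) (pvRaiseWitness_numKLenSubstrNoRepeats.2) ∧ Raises_numKLenSubstrNoRepeats (pvRaiseWitness_numKLenSubstrNoRepeats.1) (pvRaiseWitness_numKLenSubstrNoRepeats.2) ∧ numKLenSubstrNoRepeats_alt (pvRaiseWitness_numKLenSubstrNoRepeats.1) (pvRaiseWitness_numKLenSubstrNoRepeats.2) = pvRaiseWitnessOut_numKLenSubstrNoR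epeats)

-- ===== LEMMAS AND PROOFS =====

-- the window of length K starting at position t
def pvWin (cs : List Char) (K t : Nat) : List Char := (cs.drop t).take K

-- invariant of A's dict: counts and membership of the current window, unique keys
def pvInv (cs : List Char) (K t : Nat) (d : PySem.Dict Char Int) : Prop :=
  d.keys.Nodup ∧ (∀ c, d.getD c 0 = ((pvWin cs K t).count c : Int)) ∧
  (∀ c, d.contains c = true ↔ c ∈ pvWin cs K t)

-- |set(w)| = |w| iff w has no repeats
lemma pv_ofList_length_eq_dedup (w : List Char) :
    (PySem.Set.ofList w).length = w.dedup.length := by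
  have hperm : (PySem.Set.ofList w).Perm w.dedup := by
    rw [List.perm_ext_iff_of_nodup (PySem.Set.nodup_ofList w) w.nodup_dedup]
    intro a; rw [PySem.Set.mem_ofList, List.mem_dedup]
  exact hperm.length_eq

lemma pv_setLen_iff (w : List Char) :
    (PySem.Set.ofList w).length = w.length ↔ w.Nodup := by
  rw [pv_ofList_length_eq_dedup]
  constructor
  · intro h
    have := (w.dedup_sublist.eq_of_length h)
    rw [← this]; exact w.nodup_dedup
  · intro h; rw [List.dedup_eq_self.mpr h]

-- Dict.erase lemmas (none in PySem's book): get?/keys after erase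
lemma pv_find?_filter_ne (l : List (Char × Int)) (k k' : Char) (h : k' ≠ k) :
    (l.filter (fun p => !(p.1 == k))).find? (fun p => p.1 == k') = l.find? (fun p => p.1 == k') := by
  induction l with
  | nil => rfl
  | cons p t ih =>
    by_cases hk : p.1 = k
    · have h2 : (p.1 == k') = false := by
        simp only [beq_eq_false_iff_ne, ne_eq, hk]; exact fun e => h e.symm
      rw [List.filter_cons, if_neg (by simp [hk]), List.find?_cons_of_neg (by simp [h2])]
      exact ih
    · rw [List.filter_cons, if_pos (by simp [hk])]
      by_cases hk' : (p.1 == k') = true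
      · rw [List.find?_cons_of_pos (p := fun q : Char × Int => q.1 == k') hk',
            List.find?_cons_of_pos (p := fun q : Char × Int => q.1 == k') hk']
      · rw [List.find?_cons_of_neg (p := fun q : Char × Int => q.1 == k') (by simpa using hk'),
            List.find?_cons_of_neg (p := fun q : Char × Int => q.1 == k') (by simpa using hk')]
        exact ih

lemma pv_get?_erase (d : PySem.Dict Char Int) (k k' : Char) :
    (d.erase k).get? k' = if k' = k then none else d.get? k' := by
  by_cases h : k' = k
  · subst h
    simp only [PySem.Dict.get?, PySem.Dict.erase, if_pos rfl]
    rw [List.find?_eq_none.mpr]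
    · rfl
    · intro p hp
      have := List.of_mem_filter hp
      simpa using this
  · simp only [PySem.Dict.get?, PySem.Dict.erase, if_neg h]
    rw [pv_find?_filter_ne _ _ _ h]

lemma pv_getD_erase (d : PySem.Dict Char Int) (k k' : Char) :
    (d.erase k).getD k' 0 = if k' = k then 0 else d.getD k' 0 := by
  simp only [PySem.Dict.getD, pv_get?_erase]
  by_cases h : k' = k <;> simp [h]

lemma pv_contains_erase (d : PySem.Dict Char Int) (k k' : Char) :
    (d.erase k).contains k' = if k' = k then false else d.contains k' := by
  rw [PySem.Dict.contains_eq_isSome_get?, PySem.Dict.contains_eq_isSome_get?, pv_get?_erase]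
  by_cases h : k' = k <;> simp [h]

lemma pv_keys_erase (d : PySem.Dict Char Int) (k : Char) :
    (d.erase k).keys = d.keys.filter (fun x => !(x == k)) := by
  simp only [PySem.Dict.keys, PySem.Dict.erase, List.filter_map]
  rfl

lemma pv_nodup_keys_erase (d : PySem.Dict Char Int) (k : Char) (h : d.keys.Nodup) :
    (d.erase k).keys.Nodup := by
  rw [pv_keys_erase]; exact h.filter _

-- a dict satisfying the invariant has size = |set(window)|
lemma pv_size_eq (cs : List Char) (K t : Nat) (d : PySem.Dict Char Int) (h : pvInv cs K t d) :
    d.size = (PySem.Set.ofList (pvWin cs K t)).length := by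
  obtain ⟨hnd, _, hmem⟩ := h
  have hperm : d.keys.Perm (PySem.Set.ofList (pvWin cs K t)) := by
    rw [List.perm_ext_iff_of_nodup hnd (PySem.Set.nodup_ofList _)]
    intro a
    rw [PySem.Set.mem_ofList, ← PySem.Dict.contains_iff_mem_keys, hmem]
  have : d.size = d.keys.length := by simp [PySem.Dict.size, PySem.Dict.keys]
  rw [this, hperm.length_eq]

-- the two dict-update branches of A collapse to a single insert
lemma pv_branch_insert (d : PySem.Dict Char Int) (c : Char) :
    (if d.contains c then d.insert c (d.getD c 0 + 1) else d.insert c 1) =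
      d.insert c (d.getD c 0 + 1) := by
  by_cases h : d.contains c = true
  · rw [if_pos h]
  · rw [if_neg h, PySem.Dict.getD_of_not_contains d 0 (by simpa using h)]
    norm_num

-- window facts
lemma pv_win_length (cs : List Char) (K t : Nat) (h : t + K ≤ cs.length) :
    (pvWin cs K t).length = K := by
  simp [pvWin]; omega

lemma pv_win_cons (cs : List Char) (K t : Nat) (hK : 1 ≤ K) (h : t < cs.length) :
    pvWin cs K t = cs.getD t ' ' :: (cs.drop (t+1)).take (K - 1) := by
  obtain ⟨K', rfl⟩ : ∃ K', K = K' + 1 := ⟨K - 1, by omega⟩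
  simp only [pvWin, List.drop_eq_getElem_cons h, List.take_succ_cons, Nat.add_sub_cancel]
  rw [List.getD_eq_getElem _ _ h]

lemma pv_win_snoc (cs : List Char) (K t : Nat) (hK : 1 ≤ K) (h : t + K < cs.length) :
    pvWin cs K (t+1) = (cs.drop (t+1)).take (K - 1) ++ [cs.getD (t + K) ' '] := by
  obtain ⟨K', rfl⟩ : ∃ K', K = K' + 1 := ⟨K - 1, by omega⟩
  have hlt : K' < (cs.drop (t+1)).length := by simp; omega
  simp only [pvWin, Nat.add_sub_cancel, List.take_succ, List.getElem?_eq_getElem hlt,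
    Option.toList_some, List.getElem_drop]
  rw [List.getD_eq_getElem _ _ (by omega : t + (K' + 1) < cs.length)]
  norm_num
  congr 1
  omega

-- count relation between consecutive windows
lemma pv_count_step (cs : List Char) (K t : Nat) (h : t + K < cs.length) (c' : Char) :
    ((pvWin cs K (t+1)).count c' : Int) =
      ((pvWin cs K t).count c' : Int)
        + (if c' = cs.getD (t + K) ' ' then 1 else 0)
        - (if c' = cs.getD t ' ' then 1 else 0) := by
  rcases Nat.eq_zero_or_pos K with hK | hK
  · subst hK
    simp [pvWin]
  · simp only [pv_win_cons cs K t hK (by omega), pv_win_snoc cs K t hK h,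
      List.count_append, List.count_cons, List.count_nil]
    have e1 : (if c' = cs.getD t ' ' then (1:Int) else 0)
        = if (cs.getD t ' ' == c') = true then 1 else 0 := by
      by_cases hc : c' = cs.getD t ' '
      · rw [if_pos hc, if_pos (by simp [hc])]
      · rw [if_neg hc, if_neg (by simp; exact fun e => hc e.symm)]
    have e2 : (if c' = cs.getD (t + K) ' ' then (1:Int) else 0)
        = if (cs.getD (t + K) ' ' == c') = true then 1 else 0 := by
      by_cases hc : c' = cs.getD (t + K) ' '
      · rw [if_pos hc, if_pos (by simp [hc])]
      · rw [if_neg hc, if_neg (by simp; exact fun e => hc e.symm)]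
    rw [e1, e2]
    push_cast
    split_ifs <;> omega

-- one sliding step preserves the invariant and adds the new window's verdict
lemma pv_step (cs : List Char) (K t : Nat) (h : t + K < cs.length)
    (a : Int) (d : PySem.Dict Char Int) (hd : pvInv cs K t d) :
    ∃ d', pvSlideStep cs (K : Int) (a, d) ((t + K : Nat) : Int)
          = (a + (if (pvWin cs K (t+1)).Nodup then 1 else 0), d')
        ∧ pvInv cs K (t+1) d' := by
  obtain ⟨hnd, hcnt, hmem⟩ := hd
  have hyget : (PySem.List.pyGet? cs ((t + K : Nat) : Int)).getD ' ' = cs.getD (t + K) ' ' := by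
    rw [PySem.List.pyGet?_natCast, List.getD_eq_getElem?_getD]
  have hcast : ((t + K : Nat) : Int) - (K : Int) = ((t : Nat) : Int) := by push_cast; ring
  have hxget : (PySem.List.pyGet? cs (((t + K : Nat) : Int) - (K : Int))).getD ' ' = cs.getD t ' ' := by
    rw [hcast, PySem.List.pyGet?_natCast, List.getD_eq_getElem?_getD]
  set x := cs.getD t ' ' with hxdef
  set y := cs.getD (t + K) ' ' with hydef
  set w1 := d.insert y (d.getD y 0 + 1) with hw1
  set w2 := w1.insert x (w1.getD x 0 - 1) with hw2
  set w3 := if w2.getD x 0 = 0 then w2.erase x else w2 with hw3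
  have hstep : pvSlideStep cs (K : Int) (a, d) ((t + K : Nat) : Int)
      = (if (w3.size : Int) = (K : Int) then a + 1 else a, w3) := by
    simp only [pvSlideStep, hyget, hxget, hw1, hw2, hw3]
    rw [pv_branch_insert]
  -- counts of w2 are exactly the new window's counts
  have hcnt2 : ∀ c', w2.getD c' 0 = ((pvWin cs K (t+1)).count c' : Int) := by
    intro c'
    have hpc := pv_count_step cs K t h c'
    rw [hpc, hw2, PySem.Dict.getD_insert, hw1, PySem.Dict.getD_insert, PySem.Dict.getD_insert,
      hcnt, hcnt, hcnt]
    by_cases h1 : c' = x <;> by_cases h2 : c' = y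
    · have hxy : x = y := by rw [← h1, h2]
      rw [if_pos h1, if_pos hxy, if_pos h2, if_pos h1, h1, hxy]
      try ring
    · have hxy : ¬ x = y := fun e => h2 (h1.trans e)
      rw [if_pos h1, if_neg hxy, if_neg h2, if_pos h1, h1]
      try ring
    · rw [if_neg h1, if_pos h2, if_neg h1, if_pos h2, h2]
      try ring
    · rw [if_neg h1, if_neg h2, if_neg h1, if_neg h2]
      try ring
  -- w2 contains c' iff c' = x, c' = y or c' in the old window
  have hmem2 : ∀ c', w2.contains c' = true ↔ (c' = x ∨ c' = y ∨ c' ∈ pvWin cs K t) := by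
    intro c'
    rw [hw2, PySem.Dict.contains_insert, hw1, PySem.Dict.contains_insert]
    simp only [Bool.or_eq_true, beq_iff_eq]
    rw [hmem c']
  have hnd2 : w2.keys.Nodup :=
    PySem.Dict.nodup_keys_insert _ _ _ (PySem.Dict.nodup_keys_insert _ _ _ hnd)
  -- invariant for w3
  have hinv3 : pvInv cs K (t+1) w3 := by
    rcases Nat.eq_zero_or_pos K with hK0 | hK1
    · -- K = 0: both windows are empty and x = y; the zero entry is erased
      have hxy : x = y := by subst hK0; rfl
      have hwnil : pvWin cs K (t+1) = [] := by simp [pvWin, hK0]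
      have hwnil0 : pvWin cs K t = [] := by simp [pvWin, hK0]
      have hcond : w2.getD x 0 = 0 := by rw [hcnt2, hwnil]; simp
      rw [hw3, if_pos hcond]
      refine ⟨pv_nodup_keys_erase _ _ hnd2, ?_, ?_⟩
      · intro c'
        rw [pv_getD_erase, hwnil]
        by_cases hc : c' = x
        · simp [hc]
        · rw [if_neg hc, hcnt2, hwnil]
      · intro c'
        rw [pv_contains_erase, hwnil]
        by_cases hc : c' = x
        · simp [hc]
        · rw [if_neg hc, hmem2, hwnil0]
          simp [hc, show ¬ c' = y from fun e => hc (e.trans hxy.symm)]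
    · -- K ≥ 1
      have hTcons := pv_win_cons cs K t hK1 (by omega)
      have hTsnoc := pv_win_snoc cs K t hK1 h
      by_cases hcond : w2.getD x 0 = 0
      · -- x's count dropped to zero: erase it
        have hxcnt : (pvWin cs K (t+1)).count x = 0 := by
          have hq := hcnt2 x; rw [hcond] at hq; exact_mod_cast hq.symm
        have hxnot : x ∉ pvWin cs K (t+1) := by
          intro hm; have := List.count_pos_iff.mpr hm; omega
        rw [hw3, if_pos hcond]
        refine ⟨pv_nodup_keys_erase _ _ hnd2, ?_, ?_⟩
        · intro c'
          rw [pv_getD_erase]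
          by_cases hc : c' = x
          · rw [if_pos hc, hc, ← hcnt2 x]; exact hcond.symm
          · rw [if_neg hc, hcnt2]
        · intro c'
          rw [pv_contains_erase]
          by_cases hc : c' = x
          · simp [hc, hxnot]
          · rw [if_neg hc, hmem2, hTcons, hTsnoc]
            simp only [List.mem_cons, List.mem_append, List.mem_singleton, List.not_mem_nil, or_false]
            constructor
            · rintro (hcx | hcy | hh | ht)
              · exact absurd hcx hc
              · exact Or.inr hcy
              · exact absurd hh hc
              · exact Or.inl ht
            · rintro (ht | hy)
              · exact Or.inr (Or.inr (Or.inr ht))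
              · exact Or.inr (Or.inl hy)
      · -- x still occurs in the new window
        have hxcnt : (pvWin cs K (t+1)).count x ≠ 0 := by
          intro e
          exact hcond (by rw [hcnt2 x, e]; norm_num)
        have hxin : x ∈ pvWin cs K (t+1) :=
          List.count_pos_iff.mp (Nat.pos_of_ne_zero hxcnt)
        rw [hTsnoc] at hxin
        rw [hw3, if_neg hcond]
        refine ⟨hnd2, fun c' => hcnt2 c', ?_⟩
        intro c'
        rw [hmem2, hTcons, hTsnoc]
        simp only [List.mem_cons, List.mem_append, List.mem_singleton, List.not_mem_nil, or_false] at hxin ⊢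
        constructor
        · rintro (hcx | hcy | hh | ht)
          · exact hcx ▸ hxin
          · exact Or.inr hcy
          · exact hh ▸ hxin
          · exact Or.inl ht
        · rintro (ht | hy)
          · exact Or.inr (Or.inr (Or.inr ht))
          · exact Or.inr (Or.inl hy)
  -- the size test is the distinctness test of the new window
  have hsz : ((w3.size : Int) = (K : Int)) ↔ (pvWin cs K (t+1)).Nodup := by
    rw [pv_size_eq cs K (t+1) w3 hinv3, Int.natCast_inj,
      ← pv_setLen_iff (pvWin cs K (t+1)), pv_win_length cs K (t+1) (by omega)]
  refine ⟨w3, ?_, hinv3⟩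
  rw [hstep]
  by_cases hn : (pvWin cs K (t+1)).Nodup
  · rw [if_pos (hsz.mpr hn), if_pos hn]
  · rw [if_neg (fun hh => hn (hsz.mp hh)), if_neg hn]
    norm_num

-- the sliding loop, folded over a Nat range, from any state satisfying the invariant
lemma pv_slide (cs : List Char) (K : Nat) :
    ∀ (T t : Nat) (a : Int) (d : PySem.Dict Char Int), t + T + K ≤ cs.length → pvInv cs K t d →
    ∃ d', (List.range T).foldl (fun st j => pvSlideStep cs (K : Int) st ((t + K + j : Nat) : Int)) (a, d)
          = (a + ((List.range T).countP (fun j => decide ((pvWin cs K (t + j + 1)).Nodup)) : Int), d')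
        ∧ pvInv cs K (t + T) d' := by
  intro T
  induction T with
  | zero =>
    intro t a d hle hinv
    exact ⟨d, by simp, by simpa using hinv⟩
  | succ T ih =>
    intro t a d hle hinv
    obtain ⟨d', heq, hinv'⟩ := ih t a d (by omega) hinv
    obtain ⟨d'', hq, hinv''⟩ := pv_step cs K (t + T) (by omega)
      (a + ((List.range T).countP (fun j => decide ((pvWin cs K (t + j + 1)).Nodup)) : Int)) d' hinv'
    have hidx : ((t + K + T : Nat) : Int) = (((t + T) + K : Nat) : Int) := by push_cast; ring
    refine ⟨d'', ?_, by rw [show t + (T + 1) = t + T + 1 by ring]; exact hinv''⟩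
    rw [List.range_succ, List.foldl_append, heq]
    simp only [List.foldl_cons, List.foldl_nil, hidx, hq]
    rw [List.countP_append, Prod.mk.injEq]
    refine ⟨?_, rfl⟩
    simp only [List.countP_cons, List.countP_nil]
    by_cases hn : (pvWin cs K (t + T + 1)).Nodup <;> simp [hn] <;> push_cast <;> ring

-- A's first loop builds the window-0 counter
lemma pv_init (cs : List Char) (K : Nat) (hK : K ≤ cs.length) :
    pvInv cs K 0 ((PySem.List.pyRange 0 (K : Int)).foldl
      (fun (w : PySem.Dict Char Int) i =>
        let c := (PySem.List.pyGet? cs i).getD ' '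
        if w.contains c then w.insert c (w.getD c 0 + 1) else w.insert c 1)
      PySem.Dict.empty) := by
  have hlen : PySem.List.len (cs.take K) = (K : Int) := by
    simp [PySem.List.len]; omega
  have hconv : (PySem.List.pyRange 0 (K : Int)).foldl
      (fun (w : PySem.Dict Char Int) i =>
        let c := (PySem.List.pyGet? cs i).getD ' '
        if w.contains c then w.insert c (w.getD c 0 + 1) else w.insert c 1)
      PySem.Dict.empty
      = (cs.take K).foldl (fun w c => w.insert c (w.getD c 0 + 1)) PySem.Dict.empty := by
    have hmain := PySem.List.foldl_pyRange_zero_pyGetD (cs.take K) ' '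
      (fun (w : PySem.Dict Char Int) c => w.insert c (w.getD c 0 + 1)) PySem.Dict.empty
    rw [hlen] at hmain
    rw [← hmain]
    apply PySem.List.foldl_congr_mem
    intro acc i hi
    obtain ⟨h0, hiK⟩ := PySem.List.mem_pyRange_one.mp hi
    obtain ⟨j, rfl⟩ : ∃ j : Nat, i = (j : Int) := ⟨i.toNat, (Int.toNat_of_nonneg h0).symm⟩
    have hjK : j < K := by exact_mod_cast hiK
    have hget : (PySem.List.pyGet? cs (j : Int)).getD ' ' = PySem.List.pyGetD (cs.take K) (j : Int) ' ' := by
      rw [PySem.List.pyGetD, PySem.List.pyGet?_natCast, PySem.List.pyGet?_natCast,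
        List.getElem?_take, if_pos hjK]
    simp only [hget]
    rw [pv_branch_insert]
  rw [hconv]
  refine ⟨PySem.Dict.nodup_keys_foldl_insert _ _ _ PySem.Dict.nodup_keys_empty, ?_, ?_⟩
  · intro c
    rw [PySem.Dict.getD_foldl_insert_add_one, PySem.Dict.getD_empty]
    simp [pvWin]
  · intro c
    rw [PySem.Dict.contains_iff_mem_keys, PySem.Dict.keys_foldl_insert, PySem.Dict.keys_empty,
      PySem.Set.update_nil_left, PySem.Set.mem_ofList]
    simp [pvWin]

-- B equals the countP-over-starts spec (k = K ≤ |cs|)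
lemma pv_alt_eq (s : String) (K : Nat) (hK : K ≤ s.toList.length) :
    numKLenSubstrNoRepeats_alt s (K : Int)
      = ((List.range (s.toList.length - K + 1)).countP
          (fun i => decide ((pvWin s.toList K i).Nodup)) : Int) := by
  simp only [numKLenSubstrNoRepeats_alt]
  rw [if_neg (by rw [PySem.Str.len_eq]; push_neg; exact ⟨by omega, by omega⟩)]
  set cs := s.toList with hcs
  have hrng : ((cs.length : Int) - (K : Int) + 1) = ((cs.length - K + 1 : Nat) : Int) := by omega
  rw [hrng, PySem.List.pyRange_zero_natCast, List.foldl_map,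
    PySem.List.foldl_ite_add_one
      (fun (i : Nat) => ((PySem.Set.ofList (PySem.List.slice cs (some (i : Int)) (some ((i : Int) + (K : Int))))).length : Int) = (K : Int))]
  rw [List.countP_congr, Int.zero_add]
  intro i hi
  have hiK : i + K ≤ cs.length := by
    have := List.mem_range.mp hi; omega
  have hsl : PySem.List.slice cs (some (i : Int)) (some ((i : Int) + (K : Int))) = pvWin cs K i := by
    rw [show ((i : Int) + (K : Int)) = ((i + K : Nat) : Int) by push_cast; ring,
      PySem.List.slice_natCast, pvWin, Nat.add_sub_cancel_left]
  rw [hsl]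
  simp only [decide_eq_true_eq]
  rw [show ((K : Int) = ((K : Nat) : Int)) from rfl, Int.natCast_inj,
    ← pv_setLen_iff (pvWin cs K i), pv_win_length cs K i hiK]

-- ===== VERDICT (by name: the statement is the Claim_ definition above) =====
theorem numKLenSubstrNoRepeats_spec : Claim_equal_numKLenSubstrNoRepeats := by
  intro s k _ hpre
  unfold Spec_numKLenSubstrNoRepeats
  obtain ⟨K, rfl⟩ : ∃ K : Nat, k = (K : Int) :=
    ⟨k.toNat, (Int.toNat_of_nonneg hpre).symm⟩
  by_cases hgt : (K : Int) > PySem.Str.len s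
  · -- k > len(s): both sides are 0
    rw [numKLenSubstrNoRepeats, if_pos hgt]
    rw [numKLenSubstrNoRepeats_alt, if_pos (Or.inr hgt)]
  · have hKn : K ≤ s.toList.length := by
      rw [PySem.Str.len_eq] at hgt; omega
    rw [pv_alt_eq s K hKn]
    rw [numKLenSubstrNoRepeats, if_neg hgt]
    simp only [PySem.Str.len_eq]
    -- the initial window dict and its size test
    have hinv0 := pv_init s.toList K hKn
    set w0 := (PySem.List.pyRange 0 (K : Int)).foldl
      (fun (w : PySem.Dict Char Int) i =>
        let c := (PySem.List.pyGet? s.toList i).getD ' '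
        if w.contains c then w.insert c (w.getD c 0 + 1) else w.insert c 1)
      PySem.Dict.empty with hw0
    have hsz0 : ((w0.size : Int) = (K : Int)) ↔ (pvWin s.toList K 0).Nodup := by
      rw [pv_size_eq s.toList K 0 w0 hinv0, Int.natCast_inj,
        ← pv_setLen_iff (pvWin s.toList K 0), pv_win_length s.toList K 0 (by omega)]
    -- rewrite the slide loop as a fold over List.range (length - K)
    have hrange : PySem.List.pyRange (K : Int) (s.toList.length : Int)
        = (List.range (s.toList.length - K)).map (fun j => ((0 + K + j : Nat) : Int)) := by
      rw [PySem.List.pyRange_one]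
      have : ((s.toList.length : Int) - (K : Int)).toNat = s.toList.length - K := by omega
      rw [this]
      apply List.map_congr_left
      intro j hj
      push_cast
      ring
    rw [hrange, List.foldl_map]
    obtain ⟨d', heq, _⟩ := pv_slide s.toList K (s.toList.length - K) 0
      (if (w0.size : Int) = (K : Int) then 1 else 0) w0 (by omega) hinv0
    rw [heq]
    -- assemble the two counts
    have hcnt0 : (if (w0.size : Int) = (K : Int) then (1:Int) else 0)
        = if (pvWin s.toList K 0).Nodup then 1 else 0 := by
      by_cases hn : (pvWin s.toList K 0).Nodup
      · rw [if_pos (hsz0.mpr hn), if_pos hn]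
      · rw [if_neg (fun hh => hn (hsz0.mp hh)), if_neg hn]
    rw [hcnt0]
    rw [List.range_succ_eq_map, List.countP_cons, List.countP_map]
    simp only [Nat.zero_add]
    have hcomp : ((fun i => decide ((pvWin s.toList K i).Nodup)) ∘ Nat.succ)
        = fun j => decide ((pvWin s.toList K (j + 1)).Nodup) := by
      funext j; rfl
    rw [hcomp]
    by_cases hn : (pvWin s.toList K 0).Nodup <;> simp [hn] <;> push_cast <;> ring

@[simp] theorem numKLenSubstrNoRepeats_raises : Claim_raises_numKLenSubstrNoRepeats := by
  unfold Claim_raises_numKLenSubstrNoRepeats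
  exact ⟨fun s k _ h hp => absurd hp (by unfold Pre_numKLenSubstrNoRepeats Raises_numKLenSubstrNoRepeats at *; omega), by decide⟩
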